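-- pv_equiv track=rewrite | github.com/donaldozoubery/open-cyber-lab | labs/directory_traversal.py | detect_traversal
-- ===== SOURCE A (Python) =====
-- def detect_traversal(payload: str) -> bool:
--     """Detect directory traversal patterns.
--
--     Args:
--         payload: Input to check
--
--     Returns:
--         bool: True if traversal detected
--     """
--     patterns = [
--         "../",
--         "..\\",
--         "..%2F",
--         "..%5C",
--         "....//",
--         "....\\\\",
--         "%2e%2e/",
--         "%2e%2e\\",
--         "..//",
--         "..\\\\",
--     ]
--
--     payload_lower = payload.lower()
--     for pattern in patterns:
--         if pattern in payload_lower: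
--             return True
--
--     return False
-- ===== SOURCE B (Python) =====
-- def detect_traversal(payload: str) -> bool:
--     """Detect directory traversal patterns by a single left-to-right scan
--     over the lowercased payload, testing every pattern at each position."""
--     patterns = [
--         "../",
--         "..\\",
--         "..%2F",
--         "..%5C",
--         "....//",
--         "....\\\\",
--         "%2e%2e/",
--         "%2e%2e\\",
--         "..//",
--         "..\\\\",
--     ]
--     s = payload.lower()
--     for i in range(len(s)):
--         if any(s.startswith(p, i) for p in patterns):
--             return True
--     return False
-- ===== Notes on version B (the rewrite author's own statement) =====
-- stated objective: alternative
-- what changed: Replaces the per-pattern containment loop (each 'in' rescanning the whole payload) with a single left-to-right scan over positions of the lowercased payload, testing every pattern as a prefix at each position.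
import Mathlib
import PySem

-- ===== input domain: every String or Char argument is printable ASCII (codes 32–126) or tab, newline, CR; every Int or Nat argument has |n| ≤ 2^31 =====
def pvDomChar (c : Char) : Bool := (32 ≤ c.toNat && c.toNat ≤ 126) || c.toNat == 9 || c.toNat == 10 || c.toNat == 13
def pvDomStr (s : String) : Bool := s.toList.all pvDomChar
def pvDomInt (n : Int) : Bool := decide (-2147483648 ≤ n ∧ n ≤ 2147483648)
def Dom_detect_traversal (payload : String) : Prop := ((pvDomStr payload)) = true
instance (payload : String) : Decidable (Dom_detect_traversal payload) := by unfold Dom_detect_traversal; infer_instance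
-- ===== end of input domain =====

-- B replaces the per-pattern 'in' loop of A by one left-to-right scan over positions of the
-- lowercased payload, testing each pattern as a prefix at every position (alternative algorithm).

-- ===== PORT A =====
def patterns_A : List String :=
  ["../", "..\\", "..%2F", "..%5C", "....//", "....\\\\", "%2e%2e/", "%2e%2e\\", "..//", "..\\\\"]

-- 'for pattern in patterns: if pattern in payload_lower: return True' / 'return False'
def detect_traversal (payload : String) : Bool :=
  let payload_lower := PySem.Str.lower payload
  patterns_A.any (fun pattern => PySem.Str.isIn pattern payload_lower)

-- ===== PORT B =====
def patterns_B : List String :=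
  ["../", "..\\", "..%2F", "..%5C", "....//", "....\\\\", "%2e%2e/", "%2e%2e\\", "..//", "..\\\\"]

-- 'for i in range(len(s)): if any(s.startswith(p, i) for p in patterns): return True' — the scan
-- over start positions i is the recursion over the suffixes of s (s.startswith(p, i) is exactly
-- 'p is a prefix of the i-th suffix').
def scanSuffixes (cs : List Char) : Bool :=
  match cs with
  | [] => false
  | c :: rest =>
      (patterns_B.any fun p => p.toList.isPrefixOf (c :: rest)) || scanSuffixes rest

def detect_traversal_alt (payload : String) : Bool :=
  scanSuffixes (PySem.Str.lower payload).toList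

-- ===== PRECONDITION & SPEC =====
def Spec_detect_traversal (payload : String) (out : Bool) : Prop := out = detect_traversal_alt payload
instance (payload : String) (out : Bool) : Decidable (Spec_detect_traversal payload out) := by unfold Spec_detect_traversal; infer_instance

-- ===== CLAIM (what is proved, stated in full; the proofs are below) =====
def Claim_equal_detect_traversal : Prop := ∀ (payload : String), Dom_detect_traversal payload → Spec_detect_traversal payload (detect_traversal payload)

-- ===== LEMMAS AND PROOFS =====

-- the scan finds exactly the patterns occurring as an infix (no pattern is empty)
theorem scanSuffixes_iff (cs : List Char) :
    scanSuffixes cs = true ↔ ∃ p ∈ patterns_B, p.toList <:+: cs := by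
  induction cs with
  | nil =>
      simp only [scanSuffixes, List.infix_nil]
      constructor
      · intro h; cases h
      · rintro ⟨p, hp, hnil⟩
        fin_cases hp <;> simp_all
  | cons c rest ih =>
      simp only [scanSuffixes, Bool.or_eq_true, List.any_eq_true, ih,
        List.isPrefixOf_iff_prefix, List.infix_cons_iff]
      constructor
      · rintro (⟨p, hp, h⟩ | ⟨p, hp, h⟩)
        · exact ⟨p, hp, Or.inl h⟩
        · exact ⟨p, hp, Or.inr h⟩
      · rintro ⟨p, hp, h | h⟩
        · exact Or.inl ⟨p, hp, h⟩
        · exact Or.inr ⟨p, hp, h⟩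

-- ===== VERDICT (by name: the statement is the Claim_ definition above) =====
theorem detect_traversal_spec : Claim_equal_detect_traversal := by
  intro payload _
  unfold Spec_detect_traversal detect_traversal detect_traversal_alt
  rw [Bool.eq_iff_iff]
  simp only [List.any_eq_true, PySem.Str.isIn_iff_infix, scanSuffixes_iff]
  rfl
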